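-- pv_equiv track=rewrite | github.com/tatsuhirotsuchiya/gakumon | 2021files/temp1/hangman.py | unmask_word
-- ===== SOURCE A (Python) =====
-- def unmask_word(word, letters):
--     st = ""
--     for c in word:
--         for l in letters:
--             if c == l:
--                 st = st + c
--                 break
--         else:
--             st = st + "_"
--     return st
-- ===== SOURCE B (Python) =====
-- def unmask_word(word, letters):
--     out = ["_"] * len(word)
--     seen = set()
--     for l in letters:
--         if l not in seen:
--             seen.add(l)
--             for i, c in enumerate(word):
--                 if c == l:
--                     out[i] = l
--     return "".join(out)
-- ===== Notes on version B (the rewrite author's own statement) =====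
-- stated objective: alternative
-- what changed: B inverts the loop nesting: it starts from a fully masked buffer and, for each distinct guessed letter (a seen-set processes duplicate letters once), reveals every position of the word holding that letter, then joins the buffer - instead of A's per-character inner scan of letters with break/else and string concatenation.
import Mathlib
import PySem

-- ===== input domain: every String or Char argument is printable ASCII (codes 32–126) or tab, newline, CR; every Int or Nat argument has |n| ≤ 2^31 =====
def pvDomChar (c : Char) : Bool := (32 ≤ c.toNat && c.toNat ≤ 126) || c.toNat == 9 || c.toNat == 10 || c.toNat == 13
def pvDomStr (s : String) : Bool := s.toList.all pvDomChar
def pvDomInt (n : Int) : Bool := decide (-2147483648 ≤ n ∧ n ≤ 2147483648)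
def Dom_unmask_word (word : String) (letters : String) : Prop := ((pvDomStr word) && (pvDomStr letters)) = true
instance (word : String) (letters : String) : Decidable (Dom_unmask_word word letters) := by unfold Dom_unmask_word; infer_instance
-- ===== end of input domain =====

-- B inverts the loop nesting: start from a fully masked buffer and reveal, per guessed
-- letter, every matching position of the word, skipping duplicate letters via a seen-set
-- (objective: alternative). Return-value equivalence; neither mutates its arguments.

-- ===== PORT A =====
-- inner 'for l in letters: if c == l: st += c; break / else: st += "_"'
-- (strings handled as List Char; Lean's own String.append is opaque to the kernel)
def unmaskInnerA (c : Char) : List Char → List Char → List Char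
  | [], st => st ++ ['_']
  | l :: ls, st => if c == l then st ++ [c] else unmaskInnerA c ls st

def unmask_word (word : String) (letters : String) : String :=
  String.ofList (word.toList.foldl (fun st c => unmaskInnerA c letters.toList st) [])

-- ===== PORT B =====
-- out = ["_"] * len(word); seen = set()
-- for l in letters: if l not in seen: seen.add(l); for i, c in enumerate(word): if c == l: out[i] = l
-- the inner indexed pass writing l at every position where word holds c == l is the
-- positionwise zipWith of word against the buffer (exact: same scan, same updates)
def unmask_word_alt (word : String) (letters : String) : String :=
  String.ofList
    (letters.toList.foldl
      (fun st l =>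
        if PySem.Set.contains st.1 l then st
        else (PySem.Set.add st.1 l,
              List.zipWith (fun c o => if c == l then l else o) word.toList st.2))
      (PySem.Set.empty, List.replicate word.toList.length '_')).2

-- ===== PRECONDITION & SPEC =====
def Spec_unmask_word (word : String) (letters : String) (out : String) : Prop := out = unmask_word_alt word letters
instance (word : String) (letters : String) (out : String) : Decidable (Spec_unmask_word word letters out) := by unfold Spec_unmask_word; infer_instance

-- ===== CLAIM (what is proved, stated in full; the proofs are below) =====
def Claim_equal_unmask_word : Prop := ∀ (word : String) (letters : String), Dom_unmask_word word letters → Spec_unmask_word word letters (unmask_word word letters)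

-- ===== LEMMAS AND PROOFS =====

-- A's inner loop over letters is exactly the membership test.
theorem unmaskInnerA_eq (c : Char) (ls st : List Char) :
    unmaskInnerA c ls st = st ++ [if c ∈ ls then c else '_'] := by
  induction ls with
  | nil => simp [unmaskInnerA]
  | cons l t ih =>
    by_cases h : c = l
    · simp [unmaskInnerA, h]
    · simp [unmaskInnerA, h, ih]

-- one reveal pass on a buffer that is a pointwise function of the word
theorem zipWith_reveal (w : List Char) (l : Char) (f : Char → Char) :
    List.zipWith (fun c o => if c == l then l else o) w (w.map f)
      = w.map (fun c => if c == l then l else f c) := by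
  induction w with
  | nil => rfl
  | cons c t ih => simp only [List.map_cons, List.zipWith_cons_cons, ih]

-- folding the dedup-guarded reveal passes over ls reveals the letters of ls not already seen
theorem foldl_reveal (ls w : List Char) (seen : List Char) (f : Char → Char) :
    (ls.foldl
      (fun st l =>
        if PySem.Set.contains st.1 l then st
        else (PySem.Set.add st.1 l,
              List.zipWith (fun c o => if c == l then l else o) w st.2))
      (seen, w.map f)).2
      = w.map (fun c => if c ∈ ls ∧ c ∉ seen then c else f c) := by
  induction ls generalizing seen f with
  | nil => simp
  | cons l t ih =>
    simp only [List.foldl_cons]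
    by_cases hl : l ∈ seen
    · rw [if_pos (by simp [hl]), ih]
      apply List.map_congr_left
      intro c _
      by_cases hc : c = l
      · subst hc; simp [hl]
      · simp [hc]
    · rw [if_neg (by simp [hl]), zipWith_reveal, ih]
      apply List.map_congr_left
      intro c _
      by_cases hc : c = l
      · subst hc; simp [hl]
      · simp only [PySem.Set.mem_add, List.mem_cons]
        by_cases hct : c ∈ t <;> by_cases hcs : c ∈ seen <;> simp [hc, hct, hcs]

theorem unmask_word_spec' (word letters : String) :
    unmask_word word letters = unmask_word_alt word letters := by
  unfold unmask_word unmask_word_alt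
  congr 1
  have h1 : List.foldl (fun st c => unmaskInnerA c letters.toList st) [] word.toList
      = List.foldl (fun st c => st ++ [if c ∈ letters.toList then c else '_']) [] word.toList :=
    PySem.List.foldl_congr_mem _ _ _ _ (fun st c _ => unmaskInnerA_eq c letters.toList st)
  rw [h1, PySem.List.foldl_append_singleton_eq_map]
  have h2 : List.replicate word.toList.length '_' = word.toList.map (fun _ => '_') := by
    simp
  rw [h2, foldl_reveal]
  simp

-- ===== VERDICT (by name: the statement is the Claim_ definition above) =====
theorem unmask_word_spec : Claim_equal_unmask_word := by
  intro word letters _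
  exact unmask_word_spec' word letters
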